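-- pv_equiv track=rewrite | github.com/robotframework/RIDE | src/robotide/utils/__init__.py | normalize_lc
-- ===== SOURCE A (Python) =====
-- def normalize_lc(string, remove='', spaces=True):
--     string = string.lower()
--     if spaces:
--         remove = remove + ' '
--     for char in remove:
--         if char in string:
--             string = string.replace(char, '')
--     return string
-- ===== SOURCE B (Python) =====
-- def normalize_lc(string, remove='', spaces=True):
--     removal = set(remove)
--     if spaces:
--         removal.add(' ')
--     return ''.join(c for c in string.lower() if c not in removal)
-- ===== Notes on version B (the rewrite author's own statement) =====
-- stated objective: idiomatic
-- what changed: Replaces A's per-removal-character str.replace scans (one full pass per character of remove) with one filtering pass over the lowercased string against a prebuilt removal set.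
import Mathlib
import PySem

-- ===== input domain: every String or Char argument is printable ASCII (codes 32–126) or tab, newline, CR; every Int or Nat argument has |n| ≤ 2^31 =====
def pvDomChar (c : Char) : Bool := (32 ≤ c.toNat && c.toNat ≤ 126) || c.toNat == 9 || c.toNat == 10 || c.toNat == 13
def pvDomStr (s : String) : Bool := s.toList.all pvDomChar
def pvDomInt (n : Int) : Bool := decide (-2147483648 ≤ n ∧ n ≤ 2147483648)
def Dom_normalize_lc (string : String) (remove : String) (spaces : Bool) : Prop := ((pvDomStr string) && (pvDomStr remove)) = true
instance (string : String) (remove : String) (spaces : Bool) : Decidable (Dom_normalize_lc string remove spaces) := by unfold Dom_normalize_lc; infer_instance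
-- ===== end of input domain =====

-- B replaces A's per-removal-character str.replace scans with one filtering pass
-- over the lowercased string against a prebuilt removal set (idiomatic).


-- ===== PORT A =====
def normalize_lc (string : String) (remove : String) (spaces : Bool) : String :=
  let string := PySem.Str.lower string
  let remove := if spaces then remove ++ " " else remove
  remove.toList.foldl
    (fun s c =>
      if PySem.Str.isIn (String.ofList [c]) s then PySem.Str.replace s (String.ofList [c]) ""
      else s)
    string

-- ===== PORT B =====
def normalize_lc_alt (string : String) (remove : String) (spaces : Bool) : String :=
  let removal : PySem.Set Char := PySem.Set.ofList remove.toList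
  let removal := if spaces then PySem.Set.add removal ' ' else removal
  String.ofList ((PySem.Str.lower string).toList.filter (fun c => !(PySem.Set.contains removal c)))

-- ===== PRECONDITION & SPEC =====
def Spec_normalize_lc (string : String) (remove : String) (spaces : Bool) (out : String) : Prop := out = normalize_lc_alt string remove spaces
instance (string : String) (remove : String) (spaces : Bool) (out : String) : Decidable (Spec_normalize_lc string remove spaces out) := by unfold Spec_normalize_lc; infer_instance

-- ===== CLAIM (what is proved, stated in full; the proofs are below) =====
def Claim_equal_normalize_lc : Prop := ∀ (string : String) (remove : String) (spaces : Bool), Dom_normalize_lc string remove spaces → Spec_normalize_lc string remove spaces (normalize_lc string remove spaces)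

-- ===== LEMMAS AND PROOFS =====

-- replace.go with a singleton pattern and empty replacement is a filter
theorem replace_go_single (c : Char) :
    ∀ (l : List Char) (fuel : Nat) (acc : List Char), l.length ≤ fuel →
      PySem.Chars.replace.go [c] [] fuel l acc = acc.reverse ++ l.filter (fun x => x ≠ c) := by
  intro l
  induction l with
  | nil =>
    intro fuel acc _
    cases fuel <;> simp [PySem.Chars.replace.go]
  | cons c' t ih =>
    intro fuel acc hf
    cases fuel with
    | zero => simp at hf
    | succ f =>
      by_cases h : c = c'
      · subst h
        simp [PySem.Chars.replace.go, List.isPrefixOf, ih f acc (by simpa using hf)]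
      · have hpre : ([c].isPrefixOf (c' :: t)) = false := by
          simp [List.isPrefixOf, h]
        have hne : ¬ c' = c := fun e => h e.symm
        simp [PySem.Chars.replace.go, hpre, ih f (c' :: acc) (by simpa using hf), hne]

theorem replace_single (s : List Char) (c : Char) :
    PySem.Chars.replace s [c] [] = s.filter (fun x => x ≠ c) := by
  simpa using replace_go_single c s s.length [] (le_refl _)

-- one step of A's loop (in either branch) is a filter on the underlying list
theorem stepA (s : String) (c : Char) :
    (if PySem.Str.isIn (String.ofList [c]) s then PySem.Str.replace s (String.ofList [c]) ""
     else s).toList = s.toList.filter (fun x => x ≠ c) := by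
  by_cases h : PySem.Chars.isIn [c] s.toList = true
  · simp [PySem.Str.replace, replace_single, h]
  · have hmem : c ∉ s.toList := fun hc =>
      h (by rw [PySem.Chars.isIn_iff_infix]; exact (List.singleton_infix_iff c s.toList).mpr hc)
    simp only [PySem.Str.isIn_eq, String.toList_ofList, h, Bool.false_eq_true, if_false]
    exact (List.filter_eq_self.mpr fun x hx => by
      simp; exact fun e => hmem (e ▸ hx)).symm

-- Set.contains agrees with list membership of the elements
theorem contains_eq_of_mem_iff (S : PySem.Set Char) (L : List Char) (x : Char)
    (h : ∀ y, y ∈ S ↔ y ∈ L) : PySem.Set.contains S x = L.contains x := by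
  rw [Bool.eq_iff_iff]
  constructor
  · intro hx
    exact List.contains_iff_mem.mpr ((h x).mp (by simpa [PySem.Set.contains] using hx))
  · intro hx
    simpa [PySem.Set.contains] using List.contains_iff_mem.mpr ((h x).mpr (List.contains_iff_mem.mp hx))

-- A's whole loop is a filter against membership in the removal characters
theorem loopA (cs : List Char) (s : String) :
    (cs.foldl
      (fun s c =>
        if PySem.Str.isIn (String.ofList [c]) s then PySem.Str.replace s (String.ofList [c]) ""
        else s) s).toList
    = s.toList.filter (fun x => !cs.contains x) := by
  induction cs generalizing s with
  | nil => simp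
  | cons c t ih =>
    simp only [List.foldl_cons, ih, stepA]
    rw [List.filter_filter]
    apply List.filter_congr
    intro x _
    by_cases hx : x = c <;> simp [hx]

-- ===== VERDICT (by name: the statement is the Claim_ definition above) =====
theorem normalize_lc_spec : Claim_equal_normalize_lc := by
  intro string remove spaces _
  unfold Spec_normalize_lc normalize_lc normalize_lc_alt
  rw [← String.toList_inj]
  simp only [loopA, String.toList_ofList]
  apply List.filter_congr
  intro x _
  congr 1
  cases spaces
  · simp only [Bool.false_eq_true, if_false]
    refine (contains_eq_of_mem_iff _ _ x fun y => ?_).symm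
    rw [PySem.Set.mem_ofList]
  · simp only [if_true]
    refine (contains_eq_of_mem_iff _ _ x fun y => ?_).symm
    rw [PySem.Set.mem_add, PySem.Set.mem_ofList]
    simp
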